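-- pv_equiv track=rewrite | github.com/edcoyote16/Python_data_structures_and_algorithms_challenges | Jesse and cookies.py | cookies
-- ===== SOURCE A (Python) =====
-- def cookies(k, A):
--     A=list(set(A))
--     #sweetness = 1 X Least sweet cookie + 2 X 2nd least sweet cookie)
--     iterations=0
--     while min(A) <= k and len(A)>=2:
--
--         first_least_sweet_cookie = A.pop(A.index(min(A)))
--         second_least_sweet_cookie = A.pop(A.index(min(A)))
--         new_member=first_least_sweet_cookie + (2 * second_least_sweet_cookie)
--         if len(A)==1 and A[0]<k:
--             return -1
--         if new_member not in A:
--             A+=[new_member]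
--         iterations+=1
--
--
--     return iterations
-- ===== SOURCE B (Python) =====
-- def _insort_desc_unique(vals, x):
--     """Binary-insert x into descending sorted duplicate-free vals (in place);
--     do nothing if x is already present."""
--     lo, hi = 0, len(vals)
--     while lo < hi:
--         mid = (lo + hi) // 2
--         if vals[mid] > x:
--             lo = mid + 1
--         else:
--             hi = mid
--     if lo < len(vals) and vals[lo] == x:
--         return
--     vals.insert(lo, x)
--
--
-- def cookies(k, A):
--     vals = sorted(set(A), reverse=True)  # smallest cookie at the end
--     ops = 0
--     while len(vals) >= 2 and vals[-1] <= k: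
--         a = vals.pop()
--         b = vals.pop()
--         if len(vals) == 1 and vals[0] < k:
--             return -1
--         _insort_desc_unique(vals, a + 2 * b)
--         ops += 1
--     return ops
-- ===== Notes on version B (the rewrite author's own statement) =====
-- stated objective: faster
-- what changed: A rescans the unordered working list every iteration (min(), index(), membership test, positional pops); B sorts the deduplicated cookies once in descending order, then pops the two smallest in O(1) from the end and re-inserts the combined cookie by hand-written binary search, keeping the list sorted and duplicate-free.
import Mathlib
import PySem

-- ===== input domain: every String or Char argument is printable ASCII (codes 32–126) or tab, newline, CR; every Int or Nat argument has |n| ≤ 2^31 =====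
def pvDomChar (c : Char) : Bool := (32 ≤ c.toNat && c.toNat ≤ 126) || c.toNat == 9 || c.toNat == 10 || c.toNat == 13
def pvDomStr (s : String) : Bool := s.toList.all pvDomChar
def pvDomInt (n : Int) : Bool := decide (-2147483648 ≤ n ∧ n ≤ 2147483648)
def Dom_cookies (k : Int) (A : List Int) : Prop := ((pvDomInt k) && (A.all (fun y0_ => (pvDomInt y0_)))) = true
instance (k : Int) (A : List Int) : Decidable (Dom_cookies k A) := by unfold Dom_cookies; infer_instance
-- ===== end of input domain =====

-- B replaces A's per-iteration min()/index()/membership scans over an unordered list by one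
-- descending sort plus O(1) pops from the end and a binary insertion.

-- ===== PORT A =====
-- The while-loop of A.  State: lst = the working list A (duplicate-free), its = iterations.
-- `first = A.pop(A.index(min(A)))` removes the first occurrence of the minimum and binds it,
-- which is exactly `m = min(lst)`, `lst.erase m` (List.erase removes the first occurrence).
-- `A[0]` under `len(A)==1` is the head.  Each iteration shrinks lst by at least one element, so
-- fuel = lst.length never runs out; the `none` branches (Python: min([]) raises ValueError) are
-- only reachable for the empty input, which Pre_cookies excludes.
def cookiesLoopA : Nat → Int → List Int → Int → Int
  | 0, _, _, its => its
  | fuel + 1, k, lst, its =>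
    match PySem.List.min? lst (fun x => x) with
    | none => its
    | some m =>
      if m ≤ k ∧ 2 ≤ lst.length then
        match PySem.List.min? (lst.erase m) (fun x => x) with
        | none => its
        | some m2 =>
          if ((lst.erase m).erase m2).length = 1 ∧ ((lst.erase m).erase m2).headI < k then -1
          else if m + 2 * m2 ∈ (lst.erase m).erase m2 then
            cookiesLoopA fuel k ((lst.erase m).erase m2) (its + 1)
          else
            cookiesLoopA fuel k (((lst.erase m).erase m2) ++ [m + 2 * m2]) (its + 1)
      else its

def cookies (k : Int) (A : List Int) : Int :=
  cookiesLoopA (PySem.Set.ofList A).length k (PySem.Set.ofList A) 0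

-- ===== PORT B =====
-- The while-loop of Source B's _insort_desc_unique: binary search on the descending list for the
-- first index whose element is not > x.  It halves hi - lo each turn, so fuel = vals.length
-- (≥ the initial hi - lo) suffices; vals[mid] is in range whenever hi ≤ len (.getD 0 unused).
def bsearchGt : Nat → List Int → Int → Nat → Nat → Nat
  | 0, _, _, lo, _ => lo
  | fuel + 1, vals, x, lo, hi =>
    if lo < hi then
      if x < (PySem.List.pyGet? vals (((lo + hi) / 2 : Nat) : Int)).getD 0 then
        bsearchGt fuel vals x ((lo + hi) / 2 + 1) hi
      else bsearchGt fuel vals x lo ((lo + hi) / 2)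
    else lo

-- Source B's _insort_desc_unique (returning the new list instead of mutating vals in place)
def insortDescUnique (vals : List Int) (x : Int) : List Int :=
  if bsearchGt vals.length vals x 0 vals.length < vals.length ∧
      vals[bsearchGt vals.length vals x 0 vals.length]? = some x then vals
  else PySem.List.insert vals ((bsearchGt vals.length vals x 0 vals.length : Nat) : Int) x

-- The while-loop of Source B's cookies.  vals is kept sorted descending and duplicate-free;
-- vals[-1]/pop() work on the end.  Each iteration shrinks vals by at least one element, so
-- fuel = vals.length never runs out; the `none` branches are unreachable (guarded by 2 ≤ len).
def cookiesLoopB : Nat → Int → List Int → Int → Int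
  | 0, _, _, ops => ops
  | fuel + 1, k, vals, ops =>
    if 2 ≤ vals.length then
      match PySem.List.pyGet? vals (-1) with
      | none => ops
      | some last =>
        if last ≤ k then
          match PySem.List.pop? vals (-1) with
          | none => ops
          | some (a, vals1) =>
            match PySem.List.pop? vals1 (-1) with
            | none => ops
            | some (b, vals2) =>
              if vals2.length = 1 ∧ vals2.headI < k then -1
              else cookiesLoopB fuel k (insortDescUnique vals2 (a + 2 * b)) (ops + 1)
        else ops
    else ops

def cookies_alt (k : Int) (A : List Int) : Int :=
  cookiesLoopB (PySem.List.sorted (PySem.Set.ofList A) (fun x => x) true).length k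
    (PySem.List.sorted (PySem.Set.ofList A) (fun x => x) true) 0

-- ===== PRECONDITION & SPEC =====
-- Pre_ excludes only the empty list: there Python's A raises ValueError (min of empty sequence).
def Pre_cookies (k : Int) (A : List Int) : Prop := A ≠ []
instance (k : Int) (A : List Int) : Decidable (Pre_cookies k A) := by unfold Pre_cookies; infer_instance
def pvWitness_cookies : Int × List Int := (7, [1, 2, 3, 9, 7, 2])

def Spec_cookies (k : Int) (A : List Int) (out : Int) : Prop := out = cookies_alt k A
instance (k : Int) (A : List Int) (out : Int) : Decidable (Spec_cookies k A out) := by unfold Spec_cookies; infer_instance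

-- ===== CLAIM (what is proved, stated in full; the proofs are below) =====
def Claim_equal_cookies : Prop := ∀ (k : Int) (A : List Int), Dom_cookies k A → Pre_cookies k A → Spec_cookies k A (cookies k A)

-- ===== LEMMAS AND PROOFS =====

-- On a strictly descending list, entries are antitone in the index.
theorem getElem_anti_of_pairwise_gt {l : List Int} (h : l.Pairwise (· > ·))
    {i j : Nat} (hij : i ≤ j) (hj : j < l.length) : l[j]'hj ≤ l[i]'(lt_of_le_of_lt hij hj) := by
  rcases eq_or_lt_of_le hij with rfl | hlt
  · exact le_refl _
  · exact le_of_lt ((List.pairwise_iff_getElem.mp h) i j _ hj hlt)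

-- Characterisation of the binary-search loop on a strictly descending list.
theorem bsearchGt_spec {vals : List Int} (hs : vals.Pairwise (· > ·)) (x : Int) :
    ∀ (fuel lo hi : Nat), hi ≤ vals.length → lo ≤ hi → hi - lo ≤ fuel →
    (∀ i (h : i < vals.length), i < lo → x < vals[i]) →
    (∀ i (h : i < vals.length), hi ≤ i → vals[i] ≤ x) →
    lo ≤ bsearchGt fuel vals x lo hi ∧ bsearchGt fuel vals x lo hi ≤ hi ∧
    (∀ i (h : i < vals.length), i < bsearchGt fuel vals x lo hi → x < vals[i]) ∧
    (∀ i (h : i < vals.length), bsearchGt fuel vals x lo hi ≤ i → vals[i] ≤ x) := by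
  intro fuel
  induction fuel with
  | zero =>
    intro lo hi hhi hlohi hfuel hlow hhigh
    have : hi = lo := by omega
    subst this
    exact ⟨le_refl _, le_refl _, hlow, hhigh⟩
  | succ fuel ih =>
    intro lo hi hhi hlohi hfuel hlow hhigh
    by_cases hlt : lo < hi
    · have hmidlt : (lo + hi) / 2 < vals.length := by omega
      have hget : (PySem.List.pyGet? vals (((lo + hi) / 2 : Nat) : Int)).getD 0
          = vals[(lo + hi) / 2] := by
        rw [PySem.List.pyGet?_natCast, List.getElem?_eq_getElem hmidlt]; rfl
      simp only [bsearchGt, if_pos hlt, hget]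
      by_cases hcmp : x < vals[(lo + hi) / 2]
      · rw [if_pos hcmp]
        have h1 := ih ((lo + hi) / 2 + 1) hi hhi (by omega) (by omega)
          (fun i hil hi2 => by
            rcases Nat.lt_or_ge i lo with h | h
            · exact hlow i hil h
            · exact lt_of_lt_of_le hcmp (getElem_anti_of_pairwise_gt hs (by omega) hmidlt))
          hhigh
        exact ⟨by omega, by omega, h1.2.2.1, h1.2.2.2⟩
      · rw [if_neg hcmp]
        push_neg at hcmp
        have h1 := ih lo ((lo + hi) / 2) (by omega) (by omega) (by omega)
          hlow
          (fun i hil hi2 =>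
            le_trans (getElem_anti_of_pairwise_gt hs hi2 hil) hcmp)
        exact ⟨h1.1, by omega, h1.2.2.1, h1.2.2.2⟩
    · simp only [bsearchGt, if_neg hlt]
      have : hi = lo := by omega
      subst this
      exact ⟨le_refl _, le_refl _, hlow, hhigh⟩

-- The two insertion facts about _insort_desc_unique on a strictly descending list.
theorem insortDescUnique_of_mem {vals : List Int} (hs : vals.Pairwise (· > ·))
    {x : Int} (hx : x ∈ vals) : insortDescUnique vals x = vals := by
  have hspec := bsearchGt_spec hs x vals.length 0 vals.length
    le_rfl (Nat.zero_le _) (by omega) (fun i h hi => absurd hi (Nat.not_lt_zero i))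
    (fun i h hi => absurd h (by omega))
  set r := bsearchGt vals.length vals x 0 vals.length with hr
  obtain ⟨-, hrle, hlow, hhigh⟩ := hspec
  obtain ⟨j, hj, hjx⟩ := List.mem_iff_getElem.mp hx
  have hrj : r ≤ j := by
    by_contra h
    have := hlow j hj (by omega)
    omega
  have hrlen : r < vals.length := by omega
  have h1 : vals[r] ≤ x := hhigh r hrlen (le_refl _)
  have h2 : x ≤ vals[r] := hjx ▸ getElem_anti_of_pairwise_gt hs hrj hj
  unfold insortDescUnique
  rw [← hr, if_pos ⟨hrlen, by rw [List.getElem?_eq_getElem hrlen]; exact congrArg some (le_antisymm h1 h2)⟩]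

theorem insortDescUnique_of_not_mem {vals : List Int} (hs : vals.Pairwise (· > ·))
    {x : Int} (hx : x ∉ vals) :
    (insortDescUnique vals x).Perm (x :: vals) ∧ (insortDescUnique vals x).Pairwise (· > ·) := by
  have hspec := bsearchGt_spec hs x vals.length 0 vals.length
    le_rfl (Nat.zero_le _) (by omega) (fun i h hi => absurd hi (Nat.not_lt_zero i))
    (fun i h hi => absurd h (by omega))
  set r := bsearchGt vals.length vals x 0 vals.length with hr
  obtain ⟨-, hrle, hlow, hhigh⟩ := hspec
  have hcond : ¬ (r < vals.length ∧ vals[r]? = some x) := by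
    rintro ⟨h1, h2⟩
    rw [List.getElem?_eq_getElem h1] at h2
    exact hx (Option.some.inj h2 ▸ List.getElem_mem h1)
  have hins : insortDescUnique vals x = vals.take r ++ x :: vals.drop r := by
    unfold insortDescUnique
    rw [if_neg (hr ▸ hcond), ← hr, PySem.List.insert_natCast vals r x hrle]
  have htake : ∀ a ∈ vals.take r, x < a := by
    intro a ha
    obtain ⟨i, hi, hia⟩ := List.mem_iff_getElem.mp ha
    have hi' : i < r := by simpa using (List.length_take ..) ▸ hi |> fun h => by omega
    have : i < vals.length := by omega
    rw [List.getElem_take] at hia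
    exact hia ▸ hlow i this hi'
  have hdrop : ∀ b ∈ vals.drop r, b < x := by
    intro b hb
    obtain ⟨i, hi, hib⟩ := List.mem_iff_getElem.mp hb
    have hlen : (vals.drop r).length = vals.length - r := List.length_drop ..
    have hi' : r + i < vals.length := by omega
    rw [List.getElem_drop] at hib
    have hle : vals[r + i] ≤ x := hhigh (r + i) hi' (by omega)
    have hne : vals[r + i] ≠ x := fun h => hx (h ▸ List.getElem_mem hi')
    omega
  constructor
  · rw [hins]
    have h1 := List.perm_middle (a := x) (l₁ := vals.take r) (l₂ := vals.drop r)
    rw [List.take_append_drop] at h1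
    exact h1
  · rw [hins]
    rw [List.pairwise_append]
    refine ⟨List.Pairwise.sublist (List.take_sublist r vals) hs, ?_, ?_⟩
    · rw [List.pairwise_cons]
      exact ⟨fun b hb => hdrop b hb, List.Pairwise.sublist (List.drop_sublist r vals) hs⟩
    · intro a ha b hb
      rcases List.mem_cons.mp hb with rfl | hb
      · exact htake a ha
      · exact lt_trans (hdrop b hb) (htake a ha)

-- The last element of a strictly descending permutation of lst is min(lst),
-- and dropping it matches erasing the minimum.
theorem last_is_min {ys : List Int} {m' m : Int} {lst : List Int}
    (hperm : (ys ++ [m']).Perm lst) (hp : (ys ++ [m']).Pairwise (· > ·))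
    (hm : PySem.List.min? lst (fun x => x) = some m) :
    m' = m ∧ ys.Perm (lst.erase m) := by
  have hgt : ∀ y ∈ ys, m' < y := by
    have := List.pairwise_append.mp hp
    intro y hy
    exact this.2.2 y hy m' (List.mem_singleton_self m')
  have hm'mem : m' ∈ lst := hperm.mem_iff.mp (by simp)
  have hmin : ∀ y ∈ lst, m ≤ y := fun y hy => PySem.List.min?_isMin hm y hy
  have hmmem : m ∈ lst := PySem.List.min?_mem hm
  have hm'm : m = m' := by
    have h1 : m ≤ m' := hmin m' hm'mem
    have h2 : m' ≤ m := by
      rcases (List.mem_append.mp (hperm.mem_iff.mpr hmmem)) with h | h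
      · exact le_of_lt (hgt m h)
      · simp at h; omega
    omega
  subst hm'm
  refine ⟨rfl, ?_⟩
  have herase : (ys ++ [m]).erase m = ys := by
    have : m ∉ ys := fun h => absurd (hgt m h) (lt_irrefl m)
    rw [List.erase_append_right _ this]
    simp
  have h := hperm.erase m
  rw [herase] at h
  exact h

-- Main loop equivalence: A's loop on any duplicate-free list equals B's loop on its
-- descending-sorted arrangement, with fuel ≥ length on both sides.
theorem main_loop_eq (k : Int) : ∀ (n : Nat) (lst vals : List Int) (its : Int),
    lst.length ≤ n → lst.Nodup → vals.Perm lst → vals.Pairwise (· > ·) →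
    cookiesLoopA n k lst its = cookiesLoopB n k vals its := by
  intro n
  induction n with
  | zero => intro lst vals its _ _ _ _; rfl
  | succ n ih =>
    intro lst vals its hn hnd hperm hpw
    have hlen : vals.length = lst.length := hperm.length_eq
    by_cases h2 : 2 ≤ lst.length
    · -- vals = ys ++ [m']
      rcases List.eq_nil_or_concat' vals with rfl | ⟨ys, m', rfl⟩
      · simp at hlen; omega
      have hne : lst ≠ [] := by intro h; subst h; simp at h2
      obtain ⟨m, hm⟩ : ∃ m, PySem.List.min? lst (fun x => x) = some m := by
        cases h : PySem.List.min? lst (fun x => x) with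
        | none => exact absurd ((PySem.List.min?_eq_none_iff lst _).mp h) hne
        | some mv => exact ⟨mv, rfl⟩
      obtain ⟨heq1, hysperm⟩ := last_is_min hperm hpw hm
      subst m'
      have hyspw : ys.Pairwise (· > ·) := (List.pairwise_append.mp hpw).1
      -- B's vals[-1]
      have hget : PySem.List.pyGet? (ys ++ [m]) (-1) = some m :=
        PySem.List.pyGet?_neg_one_append_singleton ys m
      by_cases hk : m ≤ k
      · -- ys = zs ++ [b']
        have hyslen : ys.length = lst.length - 1 := by simp at hlen; omega
        rcases List.eq_nil_or_concat' ys with rfl | ⟨zs, m2', rfl⟩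
        · simp at hyslen; omega
        have hl1ne : lst.erase m ≠ [] := by
          have := List.length_erase_of_mem (PySem.List.min?_mem hm)
          intro h; rw [h] at this; simp at this; omega
        obtain ⟨m2, hm2⟩ : ∃ m2, PySem.List.min? (lst.erase m) (fun x => x) = some m2 := by
          cases h : PySem.List.min? (lst.erase m) (fun x => x) with
          | none => exact absurd ((PySem.List.min?_eq_none_iff (lst.erase m) _).mp h) hl1ne
          | some mv => exact ⟨mv, rfl⟩
        obtain ⟨heq2, hzsperm⟩ := last_is_min hysperm hyspw hm2
        subst m2'
        have hzspw : zs.Pairwise (· > ·) := (List.pairwise_append.mp hyspw).1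
        -- pops
        have hpop1 : PySem.List.pop? (zs ++ [m2] ++ [m]) (-1) = some (m, zs ++ [m2]) :=
          PySem.List.pop?_last (zs ++ [m2]) m
        have hpop2 : PySem.List.pop? (zs ++ [m2]) (-1) = some (m2, zs) :=
          PySem.List.pop?_last zs m2
        -- lengths and -1-branch equivalence
        have hl2len : zs.length = ((lst.erase m).erase m2).length := hzsperm.length_eq
        have hhead : ((lst.erase m).erase m2).length = 1 →
            zs.headI = ((lst.erase m).erase m2).headI := by
          intro h1
          rcases List.length_eq_one_iff.mp h1 with ⟨c, hc⟩
          have : zs = [c] := List.perm_singleton.mp (hc ▸ hzsperm)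
          rw [this, hc]
        -- unfold one step of both loops
        simp only [cookiesLoopA, cookiesLoopB, hm, hm2, hget, hpop1, hpop2,
          if_pos (show m ≤ k ∧ 2 ≤ lst.length from ⟨hk, h2⟩),
          if_pos (show 2 ≤ (zs ++ [m2] ++ [m]).length by
            simp only [List.length_append, List.length_cons, List.length_nil]; omega),
          if_pos hk]
        by_cases hbr : ((lst.erase m).erase m2).length = 1 ∧ ((lst.erase m).erase m2).headI < k
        · rw [if_pos hbr, if_pos (by exact ⟨hl2len ▸ hbr.1, (hhead hbr.1) ▸ hbr.2⟩)]
        · have hbr' : ¬ (zs.length = 1 ∧ zs.headI < k) := by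
            intro h
            exact hbr ⟨hl2len ▸ h.1, (hhead (hl2len ▸ h.1)).symm ▸ h.2⟩
          rw [if_neg hbr, if_neg hbr']
          have hl2nd : ((lst.erase m).erase m2).Nodup := (hnd.erase m).erase m2
          have hl2len' : ((lst.erase m).erase m2).length ≤ lst.length - 2 := by
            have e1 := List.length_erase_of_mem (PySem.List.min?_mem hm)
            have e2 := List.length_erase_of_mem (PySem.List.min?_mem hm2)
            omega
          by_cases hmem : m + 2 * m2 ∈ (lst.erase m).erase m2
          · rw [if_pos hmem]
            have hmem' : m + 2 * m2 ∈ zs := hzsperm.mem_iff.mpr hmem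
            rw [insortDescUnique_of_mem hzspw hmem']
            exact ih _ _ _ (by omega) hl2nd hzsperm hzspw
          · rw [if_neg hmem]
            have hmem' : m + 2 * m2 ∉ zs := fun h => hmem (hzsperm.mem_iff.mp h)
            obtain ⟨hiperm, hipw⟩ := insortDescUnique_of_not_mem hzspw hmem'
            have hnd' : (((lst.erase m).erase m2) ++ [m + 2 * m2]).Nodup := by
              rw [List.nodup_append]
              exact ⟨hl2nd, List.nodup_singleton _, by
                intro a ha b hb
                rw [List.mem_singleton] at hb
                subst hb
                exact fun h => hmem (h ▸ ha)⟩
            have hperm' : (insortDescUnique zs (m + 2 * m2)).Perm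
                (((lst.erase m).erase m2) ++ [m + 2 * m2]) :=
              hiperm.trans ((hzsperm.cons _).trans (List.perm_append_singleton _ _).symm)
            exact ih _ _ _ (by
              simp only [List.length_append, List.length_cons, List.length_nil]; omega)
              hnd' hperm' hipw
      · -- m ≤ k fails: both stop
        simp only [cookiesLoopA, cookiesLoopB, hm, hget,
          if_neg (show ¬ (m ≤ k ∧ 2 ≤ lst.length) from fun h => hk h.1), if_neg hk]
        rw [ite_self]
    · -- fewer than 2 elements: both stop with its
      have hv2 : ¬ 2 ≤ (vals).length := by omega
      cases h : PySem.List.min? lst (fun x => x) with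
      | none => simp only [cookiesLoopA, cookiesLoopB, h, if_neg hv2]
      | some m =>
        simp only [cookiesLoopA, cookiesLoopB, h, if_neg hv2,
          if_neg (show ¬ (m ≤ k ∧ 2 ≤ lst.length) from fun hc => h2 hc.2)]

-- ===== VERDICT (by name: the statement is the Claim_ definition above) =====
theorem cookies_spec : Claim_equal_cookies := by
  intro k A _hdom _hpre
  unfold Spec_cookies cookies cookies_alt
  have hnd : (PySem.Set.ofList A).Nodup := PySem.Set.nodup_ofList A
  have hperm := PySem.List.sorted_perm (PySem.Set.ofList A) (fun x : Int => x) true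
  have hge := PySem.List.sorted_pairwise_rev (xs := PySem.Set.ofList A) (key := fun x : Int => x)
  have hndv : (PySem.List.sorted (PySem.Set.ofList A) (fun x : Int => x) true).Nodup :=
    hperm.nodup_iff.mpr hnd
  have hpw : (PySem.List.sorted (PySem.Set.ofList A) (fun x : Int => x) true).Pairwise (· > ·) := by
    have := hndv.and hge   -- List.Pairwise.and? fixed below if missing
    exact this.imp (fun h => lt_of_le_of_ne h.2 (Ne.symm h.1))
  rw [hperm.length_eq]
  exact (main_loop_eq k (PySem.Set.ofList A).length _ _ 0 le_rfl hnd hperm hpw).symm ▸ rfl
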